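-- pv_equiv track=rewrite | github.com/V1B3hR/AiMedRes | src/aimedres/security/validation.py | validate_rate_limit_config
-- ===== SOURCE A (Python) =====
-- from typing import Any, Dict, List, Optional, Tuple, Union
--
-- def validate_rate_limit_config(config: Dict[str, Any]) -> Tuple[bool, List[str]]:
--     """Validate rate limiting configuration."""
--     errors = []
--
--     required_fields = ["requests_per_minute", "burst_limit", "window_size"]
--     for field in required_fields:
--         if field not in config:
--             errors.append(f"Missing rate limit config field: {field}")
--
--     # Validate ranges
--     if "requests_per_minute" in config:
--         rpm = config["requests_per_minute"]
--         if not isinstance(rpm, int) or rpm < 1 or rpm > 10000: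
--             errors.append("requests_per_minute must be between 1 and 10000")
--
--     if "burst_limit" in config:
--         burst = config["burst_limit"]
--         if not isinstance(burst, int) or burst < 1 or burst > 1000:
--             errors.append("burst_limit must be between 1 and 1000")
--
--     return len(errors) == 0, errors
-- ===== SOURCE B (Python) =====
-- # B: single pass over the config items extracting a state (rpm, burst, window-seen),
-- # then emit errors from that state -- no per-field membership tests on the config.
-- def validate_rate_limit_config(config):
--     rpm = None
--     burst = None
--     window_seen = False
--     for key, value in config.items():
--         if key == "requests_per_minute" and rpm is None:
--             rpm = (True, value)
--         elif key == "burst_limit" and burst is None: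
--             burst = (True, value)
--         elif key == "window_size":
--             window_seen = True
--
--     errors = []
--     if rpm is None:
--         errors.append("Missing rate limit config field: requests_per_minute")
--     if burst is None:
--         errors.append("Missing rate limit config field: burst_limit")
--     if not window_seen:
--         errors.append("Missing rate limit config field: window_size")
--     if rpm is not None and not (isinstance(rpm[1], int) and 1 <= rpm[1] <= 10000):
--         errors.append("requests_per_minute must be between 1 and 10000")
--     if burst is not None and not (isinstance(burst[1], int) and 1 <= burst[1] <= 1000):
--         errors.append("burst_limit must be between 1 and 1000")
--     return not errors, errors
-- ===== Notes on version B (the rewrite author's own statement) =====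
-- stated objective: alternative
-- what changed: Instead of A's per-field membership tests and lookups into the config, B scans the config items once, extracting a state (rpm value, burst value, window-seen flag), and then emits the error list purely from that extracted state.
import Mathlib
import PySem

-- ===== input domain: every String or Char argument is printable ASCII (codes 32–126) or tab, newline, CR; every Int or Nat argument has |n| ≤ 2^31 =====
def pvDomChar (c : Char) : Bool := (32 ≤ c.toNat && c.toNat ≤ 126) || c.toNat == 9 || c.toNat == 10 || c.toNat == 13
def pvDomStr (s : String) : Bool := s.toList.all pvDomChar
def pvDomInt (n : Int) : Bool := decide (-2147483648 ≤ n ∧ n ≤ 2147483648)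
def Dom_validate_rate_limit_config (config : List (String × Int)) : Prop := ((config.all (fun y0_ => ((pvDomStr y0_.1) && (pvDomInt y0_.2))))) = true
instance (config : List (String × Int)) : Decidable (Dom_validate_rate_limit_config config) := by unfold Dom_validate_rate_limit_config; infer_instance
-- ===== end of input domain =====

-- B scans the config once extracting a state (rpm, burst, window-seen) and emits errors
-- from that state, instead of A's per-field lookups into the config (objective: alternative).
-- Note: under the Int value type, Python's `isinstance(v, int)` is always true.

-- ===== PORT A =====
-- Literal transliteration of A: loop over required_fields appending missing-field
-- errors, then the two unrolled range checks, then (len(errors) == 0, errors).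
def validate_rate_limit_config (config : List (String × Int)) : Bool × List String :=
  let errors : List String := []
  let errors := ["requests_per_minute", "burst_limit", "window_size"].foldl
    (fun errs field =>
      if (config.lookup field).isNone then
        errs ++ ["Missing rate limit config field: " ++ field]
      else errs) errors
  let errors :=
    match config.lookup "requests_per_minute" with
    | some rpm =>
        if rpm < 1 ∨ rpm > 10000 then
          errors ++ ["requests_per_minute must be between 1 and 10000"]
        else errors
    | none => errors
  let errors :=
    match config.lookup "burst_limit" with
    | some burst =>
        if burst < 1 ∨ burst > 1000 then
          errors ++ ["burst_limit must be between 1 and 1000"]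
        else errors
    | none => errors
  (errors.length == 0, errors)

-- ===== PORT B =====
-- One fold over the config items builds the extracted state; the `isNone` guards keep
-- the FIRST occurrence of a key, matching dict/assoc-list lookup semantics.
def pvExtractStep (s : Option Int × Option Int × Bool) (kv : String × Int) :
    Option Int × Option Int × Bool :=
  if kv.1 = "requests_per_minute" ∧ s.1.isNone then (some kv.2, s.2.1, s.2.2)
  else if kv.1 = "burst_limit" ∧ s.2.1.isNone then (s.1, some kv.2, s.2.2)
  else if kv.1 = "window_size" then (s.1, s.2.1, true)
  else s

-- Literal transliteration of B: the single extraction pass, then the emit stage.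
def validate_rate_limit_config_alt (config : List (String × Int)) : Bool × List String :=
  let st := config.foldl pvExtractStep (none, none, false)
  let errors : List String := []
  let errors := if st.1.isNone then errors ++ ["Missing rate limit config field: requests_per_minute"] else errors
  let errors := if st.2.1.isNone then errors ++ ["Missing rate limit config field: burst_limit"] else errors
  let errors := if !st.2.2 then errors ++ ["Missing rate limit config field: window_size"] else errors
  let errors :=
    match st.1 with
    | some v => if ¬ (1 ≤ v ∧ v ≤ 10000) then errors ++ ["requests_per_minute must be between 1 and 10000"] else errors
    | none => errors
  let errors :=
    match st.2.1 with
    | some v => if ¬ (1 ≤ v ∧ v ≤ 1000) then errors ++ ["burst_limit must be between 1 and 1000"] else errors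
    | none => errors
  (errors.isEmpty, errors)

-- ===== PRECONDITION & SPEC =====
def Spec_validate_rate_limit_config (config : List (String × Int)) (out : Bool × List String) : Prop := out = validate_rate_limit_config_alt config
instance (config : List (String × Int)) (out : Bool × List String) : Decidable (Spec_validate_rate_limit_config config out) := by unfold Spec_validate_rate_limit_config; infer_instance

-- ===== CLAIM =====
def Claim_equal_validate_rate_limit_config : Prop := ∀ (config : List (String × Int)), Dom_validate_rate_limit_config config → Spec_validate_rate_limit_config config (validate_rate_limit_config config)

-- ===== LEMMAS AND PROOFS =====

-- The extraction fold computes exactly the first-match lookups of the three fields.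
theorem pvExtract_eq (config : List (String × Int)) (r b : Option Int) (w : Bool) :
    config.foldl pvExtractStep (r, b, w) =
      (r.or (config.lookup "requests_per_minute"),
       b.or (config.lookup "burst_limit"),
       w || (config.lookup "window_size").isSome) := by
  induction config generalizing r b w with
  | nil => simp
  | cons kv rest ih =>
    obtain ⟨k, v⟩ := kv
    simp only [List.foldl_cons, pvExtractStep, List.lookup]
    by_cases h1 : k = "requests_per_minute"
    · subst h1
      by_cases hr : r = none
      · subst hr; simp [ih]
      · obtain ⟨x, rfl⟩ := Option.ne_none_iff_exists'.mp hr
        simp [ih]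
    · by_cases h2 : k = "burst_limit"
      · subst h2
        by_cases hb : b = none
        · simp [hb, h1, ih]
        · obtain ⟨x, rfl⟩ := Option.ne_none_iff_exists'.mp hb
          simp [h1, ih]
      · by_cases h3 : k = "window_size"
        · subst h3; simp [h1, h2, ih]
        · have e1 : ("requests_per_minute" == k) = false := by simp [Ne.symm h1]
          have e2 : ("burst_limit" == k) = false := by simp [Ne.symm h2]
          have e3 : ("window_size" == k) = false := by simp [Ne.symm h3]
          simp [ih, h1, h2, h3, e1, e2, e3]

-- ===== VERDICT =====
theorem validate_rate_limit_config_spec : Claim_equal_validate_rate_limit_config := by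
  intro config _
  unfold Spec_validate_rate_limit_config validate_rate_limit_config validate_rate_limit_config_alt
  rw [pvExtract_eq]
  simp only [List.foldl, Option.none_or, Bool.false_or]
  cases h1 : config.lookup "requests_per_minute" <;>
  cases h2 : config.lookup "burst_limit" <;>
  cases h3 : config.lookup "window_size" <;>
    simp <;> split_ifs <;> (try simp_all) <;> omega
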